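-- pv_equiv track=rewrite | github.com/luffydon/integrator-agent-test | app/intent_engine/rules.py | substring_hits
-- ===== SOURCE A (Python) =====
-- from typing import Dict, List, Tuple
--
-- def substring_hits(text: str, words: List[str]) -> List[str]:
--     text_l = (text or "").lower()
--     hits = []
--     for w in words:
--         wl = w.lower()
--         if wl in text_l and wl not in hits:
--             hits.append(wl)
--     return hits
-- ===== SOURCE B (Python) =====
-- def substring_hits(text, words):
--     text_l = (text or "").lower()
--     n = len(text_l)
--     lows = [w.lower() for w in words]
--     subs = set()
--     for L in set(map(len, lows)):
--         for i in range(n - L + 1):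
--             subs.add(text_l[i:i + L])
--     return [wl for wl in dict.fromkeys(lows) if wl in subs]
-- ===== Notes on version B (the rewrite author's own statement) =====
-- stated objective: faster
-- what changed: B builds a hash-set index of every substring of the lowered text whose length occurs among the words, then emits the deduplicated lowered words by O(1) set lookup, instead of A's per-word substring scan of the text with a list-membership dedup.
import Mathlib
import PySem

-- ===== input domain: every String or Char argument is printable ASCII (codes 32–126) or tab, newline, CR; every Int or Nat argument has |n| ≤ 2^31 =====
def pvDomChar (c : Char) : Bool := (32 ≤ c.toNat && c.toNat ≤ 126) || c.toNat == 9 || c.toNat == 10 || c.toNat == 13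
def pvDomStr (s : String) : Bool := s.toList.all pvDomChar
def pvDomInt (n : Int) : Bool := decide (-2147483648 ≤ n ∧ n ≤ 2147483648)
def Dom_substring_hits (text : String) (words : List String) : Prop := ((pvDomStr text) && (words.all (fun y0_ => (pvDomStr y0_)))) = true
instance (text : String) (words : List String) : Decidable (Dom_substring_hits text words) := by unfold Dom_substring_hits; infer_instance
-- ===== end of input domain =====

-- B indexes the text once: it collects every substring of the lowered text whose length
-- occurs among the lowered words into a set, then emits the deduplicated lowered words
-- that are in that set — instead of A's per-word substring scan of the text.

-- ===== PORT A =====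
def substring_hits (text : String) (words : List String) : List String :=
  let text_l := PySem.Str.lower (if text = "" then "" else text)
  words.foldl (fun hits w =>
    let wl := PySem.Str.lower w
    if PySem.Str.isIn wl text_l = true ∧ wl ∉ hits then hits ++ [wl] else hits) []

-- ===== PORT B =====
def substring_hits_alt (text : String) (words : List String) : List String :=
  let text_l := PySem.Str.lower (if text = "" then "" else text)
  let n := PySem.Str.len text_l
  let lows := words.map PySem.Str.lower
  let subs : PySem.Set String :=
    (PySem.Set.ofList (lows.map PySem.Str.len)).foldl
      (fun s L => (PySem.List.pyRange 0 (n - L + 1) 1).foldl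
        (fun s i => PySem.Set.add s (PySem.Str.slice text_l (some i) (some (i + L)))) s)
      PySem.Set.empty
  (PySem.List.dedup lows).filter (fun wl => PySem.Set.contains subs wl)

-- ===== PRECONDITION & SPEC =====
def Spec_substring_hits (text : String) (words : List String) (out : List String) : Prop := out = substring_hits_alt text words
instance (text : String) (words : List String) (out : List String) : Decidable (Spec_substring_hits text words out) := by unfold Spec_substring_hits; infer_instance

-- ===== CLAIM =====
def Claim_equal_substring_hits : Prop := ∀ (text : String) (words : List String), Dom_substring_hits text words → Spec_substring_hits text words (substring_hits text words)

-- ===== LEMMAS AND PROOFS =====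

-- A's fold starting from the p-hits of `seen` equals filtering the p-hits of the set update.
theorem pv_fold_eq_filter_update (p : String → Bool) :
    ∀ (ys seen : List String),
      ys.foldl (fun hits wl => if p wl = true ∧ wl ∉ hits then hits ++ [wl] else hits)
        (seen.filter p)
      = (PySem.Set.update seen ys).filter p := by
  intro ys
  induction ys with
  | nil => intro seen; rfl
  | cons y ys ih =>
    intro seen
    simp only [List.foldl_cons]
    by_cases hp : p y = true
    · by_cases hm : y ∈ seen
      · have h1 : (if p y = true ∧ y ∉ seen.filter p then seen.filter p ++ [y] else seen.filter p)
            = seen.filter p := by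
          rw [if_neg]; simp [List.mem_filter, hm, hp]
        have h2 : PySem.Set.update seen (y :: ys) = PySem.Set.update seen ys := by
          show PySem.Set.update (PySem.Set.add seen y) ys = _
          simp [PySem.Set.add, hm]
        rw [h1, h2, ih]
      · have h1 : (if p y = true ∧ y ∉ seen.filter p then seen.filter p ++ [y] else seen.filter p)
            = (seen ++ [y]).filter p := by
          rw [if_pos ⟨hp, by simp [List.mem_filter, hm]⟩]
          simp [List.filter_append, hp]
        have h2 : PySem.Set.update seen (y :: ys) = PySem.Set.update (seen ++ [y]) ys := by
          show PySem.Set.update (PySem.Set.add seen y) ys = _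
          simp [PySem.Set.add, hm]
        rw [h1, h2, ih]
    · have h1 : (if p y = true ∧ y ∉ seen.filter p then seen.filter p ++ [y] else seen.filter p)
          = seen.filter p := by
        rw [if_neg]; tauto
      by_cases hm : y ∈ seen
      · have h2 : PySem.Set.update seen (y :: ys) = PySem.Set.update seen ys := by
          show PySem.Set.update (PySem.Set.add seen y) ys = _
          simp [PySem.Set.add, hm]
        rw [h1, h2, ih]
      · have h2 : PySem.Set.update seen (y :: ys) = PySem.Set.update (seen ++ [y]) ys := by
          show PySem.Set.update (PySem.Set.add seen y) ys = _
          simp [PySem.Set.add, hm]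
        have h3 : (seen ++ [y]).filter p = seen.filter p := by
          simp [List.filter_append, hp]
        rw [h1, h2, ← h3, ih]

-- membership in a fold that only adds f-images
theorem pv_mem_foldl_add {α β : Type} [BEq α] [LawfulBEq α] (f : β → α) :
    ∀ (xs : List β) (s0 : PySem.Set α) (x : α),
      (x ∈ xs.foldl (fun s i => PySem.Set.add s (f i)) s0) ↔ x ∈ s0 ∨ ∃ i ∈ xs, f i = x := by
  intro xs
  induction xs with
  | nil => intro s0 x; simp
  | cons y ys ih =>
    intro s0 x
    simp only [List.foldl_cons, ih, PySem.Set.mem_add, List.mem_cons]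
    constructor
    · rintro (⟨h | h⟩ | ⟨i, hi, hf⟩)
      · exact Or.inl h
      · exact Or.inr ⟨y, Or.inl rfl, h.symm⟩
      · exact Or.inr ⟨i, Or.inr hi, hf⟩
    · rintro (h | ⟨i, hi | hi, hf⟩)
      · exact Or.inl (Or.inl h)
      · exact Or.inl (Or.inr (hi ▸ hf.symm))
      · exact Or.inr ⟨i, hi, hf⟩

-- membership in a nested fold of adds
theorem pv_mem_outer {α β γ : Type} [BEq α] [LawfulBEq α] (R : γ → List β) (g : γ → β → α) :
    ∀ (ls : List γ) (s0 : PySem.Set α) (x : α),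
      (x ∈ ls.foldl (fun s L => (R L).foldl (fun s i => PySem.Set.add s (g L i)) s) s0)
      ↔ x ∈ s0 ∨ ∃ L ∈ ls, ∃ i ∈ R L, g L i = x := by
  intro ls
  induction ls with
  | nil => intro s0 x; simp
  | cons M ms ih =>
    intro s0 x
    simp only [List.foldl_cons, ih, List.mem_cons]
    rw [pv_mem_foldl_add (f := fun i => g M i)]
    constructor
    · rintro ((h | ⟨i, hi, hf⟩) | ⟨L, hL, w⟩)
      · exact Or.inl h
      · exact Or.inr ⟨M, Or.inl rfl, i, hi, hf⟩
      · exact Or.inr ⟨L, Or.inr hL, w⟩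
    · rintro (h | ⟨L, hL | hL, w⟩)
      · exact Or.inl (Or.inl h)
      · subst hL; exact Or.inl (Or.inr w)
      · exact Or.inr ⟨L, hL, w⟩

-- a slice of the text at a nonnegative window is an infix
theorem pv_slice_infix (tl : String) (i L : Int) (h0 : 0 ≤ i) (hL : 0 ≤ L) (wl : String)
    (h : PySem.Str.slice tl (some i) (some (i + L)) = wl) : wl.toList <:+: tl.toList := by
  have hw : wl.toList = (tl.toList.drop i.toNat).take ((i + L).toNat - i.toNat) := by
    rw [← h, PySem.Str.toList_slice, PySem.Chars.slice_eq_listSlice,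
      PySem.List.slice_toNat _ h0 (by omega)]
  rw [hw]
  exact (List.take_prefix _ _).isInfix.trans (List.drop_suffix _ _).isInfix

-- conversely an infix occurrence yields a slice index inside B's range
theorem pv_infix_slice (tl wl : String) (h : wl.toList <:+: tl.toList) :
    ∃ i ∈ PySem.List.pyRange 0 (PySem.Str.len tl - PySem.Str.len wl + 1) 1,
      PySem.Str.slice tl (some i) (some (i + PySem.Str.len wl)) = wl := by
  rcases h with ⟨pre, post, hsplit⟩
  have hlen : tl.toList.length = pre.length + wl.toList.length + post.length := by
    rw [← hsplit]; simp only [List.length_append]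
  refine ⟨(pre.length : Int), ?_, ?_⟩
  · rw [PySem.List.mem_pyRange_one]
    refine ⟨by positivity, ?_⟩
    rw [PySem.Str.len_eq, PySem.Str.len_eq]
    push_cast [hlen]
    omega
  · apply String.toList_inj.mp
    rw [PySem.Str.toList_slice, PySem.Chars.slice_eq_listSlice, PySem.Str.len_eq]
    have hcast : (pre.length : Int) + (wl.toList.length : Int)
        = ((pre.length + wl.toList.length : Nat) : Int) := by push_cast; ring
    rw [hcast, PySem.List.slice_natCast]
    have hdrop : tl.toList.drop pre.length = wl.toList ++ post := by
      rw [← hsplit, List.append_assoc]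
      simp
    rw [hdrop]
    simp

-- ===== VERDICT =====
theorem substring_hits_spec : Claim_equal_substring_hits := by
  intro text words _
  show substring_hits text words = substring_hits_alt text words
  have hA : substring_hits text words
      = (PySem.List.dedup (words.map PySem.Str.lower)).filter
          (fun wl => PySem.Str.isIn wl (PySem.Str.lower (if text = "" then "" else text))) := by
    have key := pv_fold_eq_filter_update
        (fun wl => PySem.Str.isIn wl (PySem.Str.lower (if text = "" then "" else text)))
        (words.map PySem.Str.lower) []
    rw [List.foldl_map] at key
    rw [PySem.Set.update_nil_left, ← PySem.List.dedup_eq_ofList] at key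
    exact key
  have hB : substring_hits_alt text words
      = (PySem.List.dedup (words.map PySem.Str.lower)).filter
          (fun wl => PySem.Set.contains
            (((PySem.Set.ofList ((words.map PySem.Str.lower).map PySem.Str.len)).foldl
              (fun s L => (PySem.List.pyRange 0
                  (PySem.Str.len (PySem.Str.lower (if text = "" then "" else text)) - L + 1) 1).foldl
                (fun s i => PySem.Set.add s (PySem.Str.slice
                  (PySem.Str.lower (if text = "" then "" else text)) (some i) (some (i + L)))) s)
              PySem.Set.empty : PySem.Set String)) wl) := rfl
  rw [hA, hB]
  apply List.filter_congr
  intro wl hwl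
  have hwl' : wl ∈ words.map PySem.Str.lower := (PySem.List.mem_dedup _ _).mp hwl
  set tl := PySem.Str.lower (if text = "" then "" else text) with htl
  have houter := pv_mem_outer
      (R := fun L => PySem.List.pyRange 0 (PySem.Str.len tl - L + 1) 1)
      (g := fun L i => PySem.Str.slice tl (some i) (some (i + L)))
      (PySem.Set.ofList ((words.map PySem.Str.lower).map PySem.Str.len))
      PySem.Set.empty wl
  by_cases hin : PySem.Str.isIn wl tl = true
  · rw [hin]
    symm
    rw [PySem.Set.contains_iff, houter]
    refine Or.inr ⟨PySem.Str.len wl, ?_, ?_⟩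
    · rw [PySem.Set.mem_ofList]
      exact List.mem_map.mpr ⟨wl, hwl', rfl⟩
    · exact pv_infix_slice tl wl ((PySem.Str.isIn_iff_infix _ _).mp hin)
  · rw [eq_false_of_ne_true hin]
    symm
    rw [← Bool.not_eq_true, PySem.Set.contains_iff, houter]
    rintro (h | ⟨L, hL, i, hi, hf⟩)
    · simp [PySem.Set.empty] at h
    · apply hin
      rw [PySem.Set.mem_ofList] at hL
      rcases List.mem_map.mp hL with ⟨w', _, hLw⟩
      have hLnn : 0 ≤ L := by rw [← hLw, PySem.Str.len_eq]; positivity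
      rw [PySem.List.mem_pyRange_one] at hi
      rw [PySem.Str.isIn_iff_infix]
      exact pv_slice_infix tl i L hi.1 hLnn wl hf
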